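-- pv_equiv track=rewrite | github.com/edoc14/edoc22-2 | programmers-gym.py | solution
-- ===== SOURCE A (Python) =====
-- def solution(n, lost, reserve):
--     checklist= [ 0 for _ in range(n)] #전체 학생 수 만큼의 빈칸
--
--      # 자기가 체육복 안 가져온 경우
--     reserve_del = set(reserve)-set(lost)
--     lost_del = set(lost)-set(reserve)
--
--     result = n - len(lost_del) #현재 체육복 있는 사람
--
--     for cha in lost_del:
--         if cha + 1 in reserve_del:
--             checklist[cha-1] += 1 # 이 번호의 친구의 체육복 빌릴 수 있는 가능성 +1
--         if cha - 1 in reserve_del: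
--             checklist[cha-1] += 1 # +2
--
--     #빌릴 가능성 높이기
--     for i in range(n):
--         if checklist[i] >= 1: # (번호는 i+1인 상태)
--             if i in reserve_del:
--                 result += 1
--                 reserve_del.remove(i)
--             elif i+2 in reserve_del:
--                 result += 1
--                 reserve_del.remove(i+2)
--
--     return result
-- ===== SOURCE B (Python) =====
-- def solution(n, lost, reserve):
--     lost_set = set(lost) - set(reserve)
--     reserve_set = set(reserve) - set(lost)
--     answer = n - len(lost_set)
--     for r in sorted(reserve_set):
--         if r - 1 in lost_set:
--             lost_set.remove(r - 1)
--             answer += 1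
--         elif r + 1 in lost_set:
--             lost_set.remove(r + 1)
--             answer += 1
--     return answer
-- ===== Notes on version B (the rewrite author's own statement) =====
-- stated objective: simpler
-- what changed: B drops A's checklist array, the set-iteration marking pass and the range(n) scan entirely, and instead runs one greedy pass over the sorted spare-uniform students, lending each spare to the neighbouring lost student (left first); both greedies yield the same maximum count on the path graph, proved as pvF_comm.
-- outside the precondition, e.g. on solution(3, [0], [1]): A returns 2, B returns 3; on solution(2, [5], [4]): A raises IndexError, B returns 2
import Mathlib
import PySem

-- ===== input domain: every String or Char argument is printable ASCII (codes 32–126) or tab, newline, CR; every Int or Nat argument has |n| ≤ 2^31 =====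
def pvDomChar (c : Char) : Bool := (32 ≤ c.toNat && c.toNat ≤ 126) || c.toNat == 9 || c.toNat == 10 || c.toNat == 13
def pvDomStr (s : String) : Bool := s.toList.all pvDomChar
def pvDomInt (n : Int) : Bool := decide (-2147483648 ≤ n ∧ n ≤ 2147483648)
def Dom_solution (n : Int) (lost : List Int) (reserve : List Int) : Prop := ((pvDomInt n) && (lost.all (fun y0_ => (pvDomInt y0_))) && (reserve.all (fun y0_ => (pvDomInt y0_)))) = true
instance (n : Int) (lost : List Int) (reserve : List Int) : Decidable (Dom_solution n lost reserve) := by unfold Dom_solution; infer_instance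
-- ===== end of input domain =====

-- B replaces A's checklist table and range(n) scan by one greedy pass over the sorted spare-uniform
-- students (simpler: no auxiliary array, no O(n) pass); equal on the problem's 1..n domain (Pre_).

-- ===== PORT A =====
-- first loop body of A: the two guarded 'checklist[cha-1] += 1' writes
def aMark (reserve_del : PySem.Set Int) (cl : List Int) (cha : Int) : List Int :=
  -- pySetD/pyGetD are exact here: under Pre_solution every write index cha-1 is in range
  let cl1 := if (cha + 1) ∈ reserve_del then
      PySem.List.pySetD cl (cha - 1) (PySem.List.pyGetD cl (cha - 1) 0 + 1) else cl
  if (cha - 1) ∈ reserve_del then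
      PySem.List.pySetD cl1 (cha - 1) (PySem.List.pyGetD cl1 (cha - 1) 0 + 1) else cl1

-- second loop body of A; 'reserve_del.remove(i)' is guarded by the membership test, so discard is exact
def aStep (checklist : List Int) (st : Int × PySem.Set Int) (i : Int) : Int × PySem.Set Int :=
  if 1 ≤ PySem.List.pyGetD checklist i 0 then
    if i ∈ st.2 then (st.1 + 1, PySem.Set.discard st.2 i)
    else if (i + 2) ∈ st.2 then (st.1 + 1, PySem.Set.discard st.2 (i + 2))
    else st
  else st

-- A's first loop iterates over the set lost_del; each iteration touches only index cha-1 and the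
-- cha's are distinct, so the result does not depend on Python's set iteration order.
def solution (n : Int) (lost : List Int) (reserve : List Int) : Int :=
  let checklist : List Int := (PySem.List.pyRange 0 n 1).map (fun _ => (0 : Int))
  let reserve_del : PySem.Set Int := (PySem.Set.ofList reserve).diff (PySem.Set.ofList lost)
  let lost_del : PySem.Set Int := (PySem.Set.ofList lost).diff (PySem.Set.ofList reserve)
  let result : Int := n - PySem.Set.len lost_del
  let checklist := lost_del.foldl (aMark reserve_del) checklist
  ((PySem.List.pyRange 0 n 1).foldl (aStep checklist) (result, reserve_del)).1

-- ===== PORT B =====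
-- B's loop body; 'lost_set.remove(...)' is guarded by the membership test, so discard is exact
def bStep (st : Int × PySem.Set Int) (r : Int) : Int × PySem.Set Int :=
  if (r - 1) ∈ st.2 then (st.1 + 1, PySem.Set.discard st.2 (r - 1))
  else if (r + 1) ∈ st.2 then (st.1 + 1, PySem.Set.discard st.2 (r + 1))
  else st

def solution_alt (n : Int) (lost : List Int) (reserve : List Int) : Int :=
  let lost_set : PySem.Set Int := (PySem.Set.ofList lost).diff (PySem.Set.ofList reserve)
  let reserve_set : PySem.Set Int := (PySem.Set.ofList reserve).diff (PySem.Set.ofList lost)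
  ((PySem.List.sorted reserve_set (fun x => x)).foldl bStep (n - PySem.Set.len lost_set, lost_set)).1

-- ===== PRECONDITION & SPEC =====
-- Pre_ restricts to the problem's stated domain for the students that actually matter: every
-- lost-only student with an adjacent lost-free reserver must have a number in 1..n; outside that,
-- A's checklist[cha-1] either raises IndexError (cha-1 out of [-n,n-1]) or wraps to the top entry
-- of the list (cha in 1-n..0), an accident of the negative-index write.
def Pre_solution (n : Int) (lost : List Int) (reserve : List Int) : Prop :=
  ∀ cha ∈ lost, cha ∉ reserve →
    (1 ≤ cha ∧ cha ≤ n) ∨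
    (¬(cha + 1 ∈ reserve ∧ cha + 1 ∉ lost) ∧ ¬(cha - 1 ∈ reserve ∧ cha - 1 ∉ lost))
instance (n : Int) (lost : List Int) (reserve : List Int) : Decidable (Pre_solution n lost reserve) := by
  unfold Pre_solution; infer_instance

def pvWitness_solution : Int × List Int × List Int := (5, [2, 4], [3])

def Spec_solution (n : Int) (lost : List Int) (reserve : List Int) (out : Int) : Prop := out = solution_alt n lost reserve
instance (n : Int) (lost : List Int) (reserve : List Int) (out : Int) : Decidable (Spec_solution n lost reserve out) := by unfold Spec_solution; infer_instance

-- ===== CLAIM (what is proved, stated in full; the proofs are below) =====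
def Claim_equal_solution : Prop := ∀ (n : Int) (lost : List Int) (reserve : List Int), Dom_solution n lost reserve → Pre_solution n lost reserve → Spec_solution n lost reserve (solution n lost reserve)


-- ===== LEMMAS AND PROOFS =====

-- the matching count both loops compute: scan `as`, each a takes a-1 from the pool, else a+1
def pvF : List Int → PySem.Set Int → Int
  | [], _ => 0
  | a :: as, s =>
    if (a - 1) ∈ s then 1 + pvF as (PySem.Set.discard s (a - 1))
    else if (a + 1) ∈ s then 1 + pvF as (PySem.Set.discard s (a + 1))
    else pvF as s

lemma foldl_bStep_fst (rs : List Int) : ∀ (st : Int × PySem.Set Int),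
    (rs.foldl bStep st).1 = st.1 + pvF rs st.2 := by
  induction rs with
  | nil => intro st; simp [pvF]
  | cons r rs ih =>
    intro st
    simp only [List.foldl_cons, bStep, pvF]
    split_ifs <;> simp [ih] <;> ring

lemma mem_discard_cons {b x y : Int} (bs : List Int) (hbx : b ≠ x) :
    y ∈ PySem.Set.discard (b :: bs) x ↔ y ∈ (b :: PySem.Set.discard bs x) := by
  simp only [PySem.Set.mem_discard, List.mem_cons]
  constructor
  · rintro ⟨h1 | h1, h2⟩
    · exact Or.inl h1
    · exact Or.inr ⟨h1, h2⟩
  · rintro (h1 | ⟨h1, h2⟩)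
    · subst h1; exact ⟨Or.inl rfl, hbx⟩
    · exact ⟨Or.inr h1, h2⟩

lemma pvF_agree (as : List Int) : ∀ (s s' : PySem.Set Int),
    (∀ a ∈ as, ∀ y, (y = a - 1 ∨ y = a + 1) → (y ∈ s ↔ y ∈ s')) → pvF as s = pvF as s' := by
  induction as with
  | nil => intro s s' _; simp [pvF]
  | cons a as ih =>
    intro s s' h
    have h1 := h a (by simp) (a - 1) (Or.inl rfl)
    have h2 := h a (by simp) (a + 1) (Or.inr rfl)
    have htail : ∀ x, ∀ a' ∈ as, ∀ y, (y = a' - 1 ∨ y = a' + 1) →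
        (y ∈ PySem.Set.discard s x ↔ y ∈ PySem.Set.discard s' x) := by
      intro x a' ha' y hy
      simp only [PySem.Set.mem_discard]
      have := h a' (by simp [ha']) y hy
      tauto
    simp only [pvF, h1, h2]
    split_ifs with hc1 hc2
    · rw [ih _ _ (htail (a - 1))]
    · rw [ih _ _ (htail (a + 1))]
    · exact ih _ _ (fun a' ha' y hy => h a' (by simp [ha']) y hy)

lemma pvF_congr (as : List Int) (s s' : PySem.Set Int)
    (h : ∀ y, (y ∈ s ↔ y ∈ s')) : pvF as s = pvF as s' :=
  pvF_agree as s s' (fun _ _ y _ => h y)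

lemma pvF_discard_cons (as : List Int) {b x : Int} (bs : List Int) (hbx : b ≠ x) :
    pvF as (PySem.Set.discard (b :: bs) x) = pvF as (b :: PySem.Set.discard bs x) :=
  pvF_congr as _ _ (fun _ => mem_discard_cons bs hbx)

lemma pvF_discard_head (as : List Int) {b : Int} (bs : List Int) (hb : b ∉ bs) :
    pvF as (PySem.Set.discard (b :: bs) b) = pvF as bs := by
  apply pvF_congr
  intro y
  simp only [PySem.Set.mem_discard, List.mem_cons]
  constructor
  · rintro ⟨h1 | h1, h2⟩
    · exact absurd h1 h2
    · exact h1
  · intro h1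
    exact ⟨Or.inr h1, fun h2 => hb (h2 ▸ h1)⟩

lemma pvF_nil_right (as : List Int) : pvF as [] = 0 := by
  induction as with
  | nil => simp [pvF]
  | cons a as ih => simp [pvF, ih]

lemma pvF_cons_skip (as : List Int) : ∀ (b : Int) (bs : PySem.Set Int),
    (∀ a ∈ as, a - 1 ≠ b ∧ a + 1 ≠ b) → pvF as (b :: bs) = pvF as bs := by
  induction as with
  | nil => intro b bs _; simp [pvF]
  | cons a as ih =>
    intro b bs h
    have ha := h a (by simp)
    have htail : ∀ a' ∈ as, a' - 1 ≠ b ∧ a' + 1 ≠ b := fun a' ha' => h a' (by simp [ha'])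
    simp only [pvF, List.mem_cons, ha.1, ha.2, false_or]
    split_ifs with hc1 hc2
    · rw [pvF_discard_cons as bs (fun h' => ha.1 h'.symm), ih _ _ htail]
    · rw [pvF_discard_cons as bs (fun h' => ha.2 h'.symm), ih _ _ htail]
    · exact ih _ _ htail

-- core: the lost-side greedy scan and the reserve-side greedy scan give the same count
lemma pvF_comm : ∀ (N : Nat) (as bs : List Int), as.length + bs.length ≤ N →
    as.Pairwise (· < ·) → bs.Pairwise (· < ·) → (∀ a ∈ as, a ∉ bs) →
    pvF as bs = pvF bs as := by
  intro N
  induction N with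
  | zero =>
    intro as bs hlen _ _ _
    have : as = [] ∧ bs = [] := by
      constructor <;> (cases as <;> cases bs <;> simp_all)
    rw [this.1, this.2]
  | succ N ih =>
    intro as bs hlen hpa hpb hdisj
    cases as with
    | nil => rw [pvF_nil_right]; rfl
    | cons x xs =>
      cases bs with
      | nil => rw [pvF_nil_right]; rfl
      | cons r rs =>
        have hx : ∀ a ∈ xs, x < a := by
          intro a ha; exact (List.pairwise_cons.1 hpa).1 a ha
        have hr : ∀ b ∈ rs, r < b := by
          intro b hb; exact (List.pairwise_cons.1 hpb).1 b hb
        have hxs := (List.pairwise_cons.1 hpa).2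
        have hrs := (List.pairwise_cons.1 hpb).2
        have hlen' : xs.length + rs.length ≤ N := by
          simp only [List.length_cons] at hlen; omega
        have hxr : x ≠ r := by
          intro h; exact hdisj x (by simp) (by simp [h])
        rcases lt_or_gt_of_ne hxr with hlt | hgt
        · -- x < r : x is the global minimum
          have hxm1 : (x - 1) ∉ (r :: rs) := by
            intro hm
            rcases List.mem_cons.1 hm with h | h
            · omega
            · have := hr _ h; omega
          by_cases hadj : r = x + 1
          · -- adjacent: both sides match x with r
            have hxp1 : (x + 1) ∈ (r :: rs) := by simp [← hadj]
            have hrm1 : (r - 1) ∈ (x :: xs) := by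
              have : r - 1 = x := by omega
              simp [this]
            have hrn : r ∉ rs := fun h => by have := hr r h; omega
            have hxn : x ∉ xs := fun h => by have := hx x h; omega
            simp only [pvF, if_neg hxm1, if_pos hxp1, if_pos hrm1]
            have e1 : pvF xs (PySem.Set.discard (r :: rs) (x + 1)) = pvF xs rs := by
              rw [← hadj]; exact pvF_discard_head xs rs hrn
            have e2 : pvF rs (PySem.Set.discard (x :: xs) (r - 1)) = pvF rs xs := by
              have hrx : r - 1 = x := by omega
              rw [hrx]; exact pvF_discard_head rs xs hxn
            rw [e1, e2, ih xs rs hlen' hxs hrs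
              (fun a ha hb => hdisj a (by simp [ha]) (by simp [hb]))]
          · -- x + 1 < r : x matches nothing on either side
            have hxp1 : (x + 1) ∉ (r :: rs) := by
              intro hm
              rcases List.mem_cons.1 hm with h | h
              · omega
              · have := hr _ h; omega
            have e3 : pvF (r :: rs) (x :: xs) = pvF (r :: rs) xs := by
              apply pvF_cons_skip
              intro b hb
              rcases List.mem_cons.1 hb with h | h
              · omega
              · have := hr b h; omega
            conv_lhs => rw [pvF]
            rw [if_neg hxm1, if_neg hxp1, e3]
            exact ih xs (r :: rs) (by simp only [List.length_cons] at hlen ⊢; omega)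
              hxs hpb (fun a ha => hdisj a (by simp [ha]))
        · -- r < x : r is the global minimum (mirror)
          have hrm1 : (r - 1) ∉ (x :: xs) := by
            intro hm
            rcases List.mem_cons.1 hm with h | h
            · omega
            · have := hx _ h; omega
          by_cases hadj : x = r + 1
          · have hxm1 : (x - 1) ∈ (r :: rs) := by
              have : x - 1 = r := by omega
              simp [this]
            have hrp1 : (r + 1) ∈ (x :: xs) := by simp [← hadj]
            have hrn : r ∉ rs := fun h => by have := hr r h; omega
            have hxn : x ∉ xs := fun h => by have := hx x h; omega
            simp only [pvF, if_pos hxm1, if_neg hrm1, if_pos hrp1]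
            have e1 : pvF xs (PySem.Set.discard (r :: rs) (x - 1)) = pvF xs rs := by
              have hrx : x - 1 = r := by omega
              rw [hrx]; exact pvF_discard_head xs rs hrn
            have e2 : pvF rs (PySem.Set.discard (x :: xs) (r + 1)) = pvF rs xs := by
              rw [← hadj]; exact pvF_discard_head rs xs hxn
            rw [e1, e2, ih xs rs hlen' hxs hrs
              (fun a ha hb => hdisj a (by simp [ha]) (by simp [hb]))]
          · have hrp1 : (r + 1) ∉ (x :: xs) := by
              intro hm
              rcases List.mem_cons.1 hm with h | h
              · omega
              · have := hx _ h; omega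
            have e3 : pvF (x :: xs) (r :: rs) = pvF (x :: xs) rs := by
              apply pvF_cons_skip
              intro a ha
              rcases List.mem_cons.1 ha with h | h
              · omega
              · have := hx a h; omega
            conv_rhs => rw [pvF]
            rw [if_neg hrm1, if_neg hrp1, e3]
            exact ih (x :: xs) rs (by simp only [List.length_cons] at hlen ⊢; omega)
              hpa hrs (fun a ha hb => hdisj a ha (by simp [hb]))

-- checklist characterization: after A's first loop, entry k holds the number of reserve
-- neighbours of student k+1, if k+1 is a lost-only student, else 0

lemma getD_pySetD_self (cl : List Int) (e v : Int) (h0 : 0 ≤ e) (h1 : e < (cl.length : Int)) :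
    PySem.List.pyGetD (PySem.List.pySetD cl e v) e 0 = v := by
  have he : e = ((e.toNat : Nat) : Int) := (Int.toNat_of_nonneg h0).symm
  rw [he, PySem.List.pyGetD_pySetD_natCast cl e.toNat e.toNat v 0 (by omega), if_pos rfl]

lemma getD_pySetD_ne (cl : List Int) (e k v : Int) (h0 : 0 ≤ e) (h0k : 0 ≤ k)
    (h1 : e < (cl.length : Int)) (hne : k ≠ e) :
    PySem.List.pyGetD (PySem.List.pySetD cl e v) k 0 = PySem.List.pyGetD cl k 0 := by
  have he : e = ((e.toNat : Nat) : Int) := (Int.toNat_of_nonneg h0).symm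
  have hk : k = ((k.toNat : Nat) : Int) := (Int.toNat_of_nonneg h0k).symm
  rw [he, hk, PySem.List.pyGetD_pySetD_natCast cl e.toNat k.toNat v 0 (by omega),
    if_neg (by omega)]

lemma aMark_length (R0 : PySem.Set Int) (cl : List Int) (cha : Int) :
    (aMark R0 cl cha).length = cl.length := by
  unfold aMark
  split_ifs <;> simp [PySem.List.length_pySetD]

lemma aMark_getD (R0 : PySem.Set Int) (cl : List Int) (cha k : Int) (hk : 0 ≤ k)
    (hrange : (cha + 1 ∈ R0 ∨ cha - 1 ∈ R0) → 1 ≤ cha ∧ cha ≤ (cl.length : Int)) :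
    PySem.List.pyGetD (aMark R0 cl cha) k 0 =
      PySem.List.pyGetD cl k 0 +
        (if k + 1 = cha then (if k + 2 ∈ R0 then 1 else 0) + (if k ∈ R0 then 1 else 0) else 0) := by
  by_cases h1 : (cha + 1) ∈ R0 <;> by_cases h2 : (cha - 1) ∈ R0
  all_goals unfold aMark
  · -- both neighbours: two writes at cha-1
    have hb := hrange (Or.inl h1)
    have hl1 : cha - 1 < ((PySem.List.pySetD cl (cha - 1)
        (PySem.List.pyGetD cl (cha - 1) 0 + 1)).length : Int) := by
      rw [PySem.List.length_pySetD]; omega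
    rw [if_pos h1, if_pos h2]
    by_cases hc : k + 1 = cha
    · have hkc : k = cha - 1 := by omega
      subst hkc
      rw [getD_pySetD_self _ _ _ (by omega) hl1,
        getD_pySetD_self _ _ _ (by omega) (by omega)]
      simp only [if_pos hc, if_pos (show cha - 1 + 2 ∈ R0 by rwa [show cha - 1 + 2 = cha + 1 by ring]),
        if_pos h2]
      ring
    · rw [getD_pySetD_ne _ _ _ _ (by omega) hk hl1 (by omega),
        getD_pySetD_ne _ _ _ _ (by omega) hk (by omega) (by omega), if_neg hc]
      ring
  · have hb := hrange (Or.inl h1)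
    rw [if_pos h1, if_neg h2]
    by_cases hc : k + 1 = cha
    · have hkc : k = cha - 1 := by omega
      subst hkc
      rw [getD_pySetD_self _ _ _ (by omega) (by omega)]
      simp only [if_pos hc, if_pos (show cha - 1 + 2 ∈ R0 by rwa [show cha - 1 + 2 = cha + 1 by ring]),
        if_neg (show ¬ (cha - 1) ∈ R0 from h2)]
      ring
    · rw [getD_pySetD_ne _ _ _ _ (by omega) hk (by omega) (by omega), if_neg hc]
      ring
  · have hb := hrange (Or.inr h2)
    rw [if_neg h1, if_pos h2]
    by_cases hc : k + 1 = cha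
    · have hkc : k = cha - 1 := by omega
      subst hkc
      rw [getD_pySetD_self _ _ _ (by omega) (by omega)]
      simp only [if_pos hc, if_neg (show ¬ (cha - 1 + 2) ∈ R0 by
          rwa [show cha - 1 + 2 = cha + 1 by ring]), if_pos h2]
      ring
    · rw [getD_pySetD_ne _ _ _ _ (by omega) hk (by omega) (by omega), if_neg hc]
      ring
  · rw [if_neg h1, if_neg h2]
    by_cases hc : k + 1 = cha
    · simp only [if_pos hc, if_neg (show ¬ (k + 2) ∈ R0 by
          rwa [show k + 2 = cha + 1 by omega]),
        if_neg (show ¬ k ∈ R0 by rwa [show k = cha - 1 by omega])]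
      ring
    · rw [if_neg hc]; ring

lemma chk_char (R0 : PySem.Set Int) : ∀ (L : List Int) (cl : List Int),
    L.Nodup →
    (∀ x ∈ L, (x + 1 ∈ R0 ∨ x - 1 ∈ R0) → 1 ≤ x ∧ x ≤ (cl.length : Int)) →
    ∀ k : Int, 0 ≤ k →
    PySem.List.pyGetD (L.foldl (aMark R0) cl) k 0 =
      PySem.List.pyGetD cl k 0 +
        (if k + 1 ∈ L then (if k + 2 ∈ R0 then 1 else 0) + (if k ∈ R0 then 1 else 0) else 0) := by
  intro L
  induction L with
  | nil => intro cl _ _ k hk; simp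
  | cons cha L ih =>
    intro cl hnd hrange k hk
    have hcn : cha ∉ L := (List.nodup_cons.1 hnd).1
    have hnd' := (List.nodup_cons.1 hnd).2
    have hrange' : ∀ x ∈ L, (x + 1 ∈ R0 ∨ x - 1 ∈ R0) →
        1 ≤ x ∧ x ≤ ((aMark R0 cl cha).length : Int) := by
      intro x hx hnb
      rw [aMark_length]
      exact hrange x (by simp [hx]) hnb
    rw [List.foldl_cons, ih _ hnd' hrange' k hk,
      aMark_getD R0 cl cha k hk (hrange cha (by simp))]
    by_cases hc : k + 1 = cha
    · have hkL : k + 1 ∉ L := by rw [hc]; exact hcn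
      rw [if_neg hkL, if_pos (show k + 1 ∈ cha :: L by simp [hc])]
      split_ifs <;> ring
    · by_cases hm : k + 1 ∈ L
      · simp only [List.mem_cons, if_pos hm, if_pos (Or.inr hm), if_neg hc]
        ring
      · have : k + 1 ∉ (cha :: L) := by
          simp only [List.mem_cons]
          rintro (h | h)
          · exact hc h
          · exact hm h
        simp only [if_neg hm, if_neg hc, if_neg this]
        ring

lemma bStep_sub (st : Int × PySem.Set Int) (r y : Int) (h : y ∈ (bStep st r).2) : y ∈ st.2 := by
  unfold bStep at h
  split_ifs at h
  all_goals first
    | (simp only [PySem.Set.mem_discard] at h; exact h.1)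
    | exact h

-- A's range(n) scan, guarded by the checklist, is B's step applied to the lost students in
-- increasing order
lemma loop2 (C : List Int) (R0 Ld : PySem.Set Int)
    (hchar : ∀ k : Int, 0 ≤ k →
      (1 ≤ PySem.List.pyGetD C k 0 ↔ (k + 1 ∈ Ld ∧ (k + 2 ∈ R0 ∨ k ∈ R0)))) :
    ∀ (is : List Int) (st : Int × PySem.Set Int), (∀ i ∈ is, 0 ≤ i) → (∀ y ∈ st.2, y ∈ R0) →
    is.foldl (aStep C) st =
      (((is.filter (fun i => decide ((i + 1) ∈ Ld))).map (· + 1)).foldl bStep st) := by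
  intro is
  induction is with
  | nil => intro st _ _; simp
  | cons i is ih =>
    intro st hi hsub
    have hi0 : 0 ≤ i := hi i (by simp)
    have hiff := hchar i hi0
    rw [List.foldl_cons, List.filter_cons]
    by_cases hmem : (i + 1) ∈ Ld
    · rw [if_pos (by simpa using hmem), List.map_cons, List.foldl_cons]
      have hstep : aStep C st i = bStep st (i + 1) := by
        unfold aStep bStep
        rw [show i + 1 - 1 = i by ring, show i + 1 + 1 = i + 2 by ring]
        by_cases hg : i ∈ st.2
        · rw [if_pos (hiff.2 ⟨hmem, Or.inr (hsub _ hg)⟩), if_pos hg]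
        · by_cases hg2 : (i + 2) ∈ st.2
          · rw [if_pos (hiff.2 ⟨hmem, Or.inl (hsub _ hg2)⟩), if_neg hg, if_pos hg2]
          · rw [if_neg hg, if_neg hg2]
            split_ifs <;> rfl
      rw [hstep]
      exact ih _ (fun j hj => hi j (by simp [hj]))
        (fun y hy => hsub y (bStep_sub st (i + 1) y hy))
    · rw [if_neg (by simpa using hmem)]
      have : aStep C st i = st := by
        unfold aStep
        rw [if_neg]
        intro hgd
        exact hmem (hiff.1 hgd).1
      rw [this]
      exact ih _ (fun j hj => hi j (by simp [hj])) hsub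

lemma main_eq (n : Int) (lost reserve : List Int)
    (hpre : Pre_solution n lost reserve) :
    solution n lost reserve = solution_alt n lost reserve := by
  simp only [solution, solution_alt]
  set Ld : PySem.Set Int := (PySem.Set.ofList lost).diff (PySem.Set.ofList reserve) with hLdd
  set R0 : PySem.Set Int := (PySem.Set.ofList reserve).diff (PySem.Set.ofList lost) with hR0d
  set cl0 : List Int := (PySem.List.pyRange 0 n 1).map (fun _ => (0 : Int)) with hcl0
  set C : List Int := Ld.foldl (aMark R0) cl0 with hC
  set RS : List Int := PySem.List.sorted R0 (fun x => x) with hRS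
  have hLmem : ∀ y, y ∈ Ld ↔ (y ∈ lost ∧ y ∉ reserve) := by
    intro y
    rw [hLdd, PySem.Set.mem_diff]
    simp [PySem.Set.mem_ofList]
  have hRmem : ∀ y, y ∈ R0 ↔ (y ∈ reserve ∧ y ∉ lost) := by
    intro y
    rw [hR0d, PySem.Set.mem_diff]
    simp [PySem.Set.mem_ofList]
  have hdisjLR : ∀ y ∈ Ld, y ∉ R0 := by
    intro y hy hr
    exact ((hRmem y).1 hr).2 ((hLmem y).1 hy).1
  have hpre' : ∀ y ∈ Ld, (y + 1 ∈ R0 ∨ y - 1 ∈ R0) → 1 ≤ y ∧ y ≤ n := by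
    intro y hy hnb
    rcases (hLmem y).1 hy with ⟨h1, h2⟩
    rcases hpre y h1 h2 with h | h
    · exact h
    · exfalso
      rcases hnb with hb | hb
      · exact h.1 ((hRmem _).1 hb)
      · exact h.2 ((hRmem _).1 hb)
  have hLnd : Ld.Nodup := PySem.Set.nodup_diff _ _ (PySem.Set.nodup_ofList _)
  have hRnd : R0.Nodup := PySem.Set.nodup_diff _ _ (PySem.Set.nodup_ofList _)
  have hlen0 : (cl0.length : Int) = max n 0 := by
    rw [hcl0, List.length_map]
    unfold PySem.List.pyRange
    rw [if_neg (by norm_num)]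
    simp only [if_pos (by norm_num : (0:Int) < 1)]
    split_ifs with h <;> simp only [List.length_map, List.length_range] <;> omega
  have hzero : ∀ k : Int, 0 ≤ k → PySem.List.pyGetD cl0 k 0 = 0 := by
    intro k hk
    rw [PySem.List.pyGetD_of_nonneg _ _ hk]
    rcases lt_or_ge k.toNat cl0.length with h | h
    · rw [List.getD_eq_getElem _ _ h]
      simp only [hcl0, List.getElem_map]
    · rw [List.getD_eq_default _ _ h]
  have hiff : ∀ k : Int, 0 ≤ k →
      (1 ≤ PySem.List.pyGetD C k 0 ↔ (k + 1 ∈ Ld ∧ (k + 2 ∈ R0 ∨ k ∈ R0))) := by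
    intro k hk
    rw [hC, chk_char R0 Ld cl0 hLnd
      (fun x hx hnb => by have := hpre' x hx hnb; omega) k hk, hzero k hk]
    by_cases m1 : k + 1 ∈ Ld <;> by_cases m2 : k + 2 ∈ R0 <;> by_cases m3 : k ∈ R0 <;>
      simp [m1, m2, m3]
  rw [loop2 C R0 Ld hiff (PySem.List.pyRange 0 n 1) _
    (fun i hi => (PySem.List.mem_pyRange_one.1 hi).1) (fun y hy => hy),
    foldl_bStep_fst, foldl_bStep_fst]
  congr 1
  set F : List Int :=
    ((PySem.List.pyRange 0 n 1).filter (fun i => decide ((i + 1) ∈ Ld))).map (· + 1) with hF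
  have hFmem : ∀ y, y ∈ F ↔ (1 ≤ y ∧ y ≤ n ∧ y ∈ Ld) := by
    intro y
    rw [hF]
    simp only [List.mem_map, List.mem_filter, PySem.List.mem_pyRange_one, decide_eq_true_eq]
    constructor
    · rintro ⟨i, ⟨⟨hi1, hi2⟩, hi3⟩, rfl⟩
      exact ⟨by omega, by omega, hi3⟩
    · rintro ⟨h1, h2, h3⟩
      exact ⟨y - 1, ⟨⟨by omega, by omega⟩, by rwa [show y - 1 + 1 = y by ring]⟩, by omega⟩
  have hpr : (PySem.List.pyRange 0 n 1).Pairwise (· < ·) := by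
    unfold PySem.List.pyRange
    rw [if_neg (by norm_num)]
    rw [List.pairwise_map]
    exact List.pairwise_lt_range.imp (fun {a b} hab => by omega)
  have hFpair : F.Pairwise (· < ·) := by
    rw [hF]
    exact List.Pairwise.map _ (fun a b hab => by omega) (hpr.filter _)
  have hRSpair : RS.Pairwise (· < ·) := by
    have h1 : RS.Pairwise (fun a b => a ≤ b) := PySem.List.sorted_pairwise R0 (fun x => x)
    have h2 : RS.Nodup := ((PySem.List.sorted_perm R0 (fun x => x) false).nodup_iff).2 hRnd
    exact (h1.and h2).imp (fun {a b} hab => lt_of_le_of_ne hab.1 hab.2)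
  have hRSmem : ∀ y, y ∈ RS ↔ y ∈ R0 := by
    intro y
    rw [hRS]
    exact PySem.List.mem_sorted R0 (fun x => x) false y
  have hdisjF : ∀ a ∈ F, a ∉ RS :=
    fun a ha hm => hdisjLR a ((hFmem a).1 ha).2.2 ((hRSmem a).1 hm)
  calc pvF F R0 = pvF F RS := pvF_congr F R0 RS (fun y => (hRSmem y).symm)
    _ = pvF RS F := pvF_comm (F.length + RS.length) F RS le_rfl hFpair hRSpair hdisjF
    _ = pvF RS Ld := by
        apply pvF_agree
        intro a ha y hy
        constructor
        · intro hyF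
          exact ((hFmem y).1 hyF).2.2
        · intro hyLd
          have haR : a ∈ R0 := (hRSmem a).1 ha
          have hnb : y + 1 ∈ R0 ∨ y - 1 ∈ R0 := by
            rcases hy with h | h
            · exact Or.inl (by rwa [show y + 1 = a by omega])
            · exact Or.inr (by rwa [show y - 1 = a by omega])
          have := hpre' y hyLd hnb
          exact (hFmem y).2 ⟨this.1, this.2, hyLd⟩

-- ===== VERDICT (by name: the statement is the Claim_ definition above) =====
theorem solution_spec : Claim_equal_solution := by
  intro n lost reserve _ hpre
  exact main_eq n lost reserve hpre
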